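-- pv_equiv track=rewrite | github.com/sangeon-ahn/hellgorithms | programmers/퍼즐 조각 채우기2.py | spin_set
-- ===== SOURCE A (Python) =====
-- def spin_set(original):
--     spin_90 = set()
--     spin_180 = set()
--     spin_270 = set()
--     while original:
--         x, y = original.pop()
--         spin_90.add((y, -x))
--         spin_180.add((-x, -y))
--         spin_270.add((-y, x))
--     return spin_90, spin_180, spin_270
-- ===== SOURCE B (Python) =====
-- def spin_set(original):
--     # Drain `original` with .pop() (same emptying side effect as A), building only
--     # the 90-degree set; the 180 and 270 sets are obtained by rotating again.
--     spin_90 = set()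
--     while original:
--         x, y = original.pop()
--         spin_90.add((y, -x))
--     spin_180 = {(y, -x) for (x, y) in spin_90}
--     spin_270 = {(y, -x) for (x, y) in spin_180}
--     return spin_90, spin_180, spin_270
-- ===== Notes on version B (the rewrite author's own statement) =====
-- stated objective: alternative
-- what changed: B computes only the 90-degree rotation while draining the list, then derives the 180- and 270-degree sets by applying the same 90-degree rotation to the previous set, instead of three independent direct transforms in one loop.
import Mathlib
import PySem

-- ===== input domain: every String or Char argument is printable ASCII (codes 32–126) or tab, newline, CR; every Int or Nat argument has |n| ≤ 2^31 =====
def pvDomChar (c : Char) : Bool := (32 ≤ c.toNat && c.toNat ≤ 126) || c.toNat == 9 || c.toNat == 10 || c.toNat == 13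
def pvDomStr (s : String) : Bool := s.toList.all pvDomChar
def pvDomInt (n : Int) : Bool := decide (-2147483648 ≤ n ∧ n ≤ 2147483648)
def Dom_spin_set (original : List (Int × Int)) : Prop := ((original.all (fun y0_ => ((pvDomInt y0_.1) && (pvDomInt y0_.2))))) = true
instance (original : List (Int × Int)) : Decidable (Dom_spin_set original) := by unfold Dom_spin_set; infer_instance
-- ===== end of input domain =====

-- B derives the 180/270 sets by re-applying the 90-degree rotation to the previous set
-- instead of A's three independent transforms in one loop (same cost; equivalence is about
-- the return value; both Pythons also empty `original` in place).

-- ===== PORT A =====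
-- A pops from the end of `original` and adds all three rotations of each point to
-- three sets simultaneously: a fold over original.reverse with a triple of sets.
def spin_set (original : List (Int × Int)) : (List (Int × Int)) × (List (Int × Int)) × (List (Int × Int)) :=
  original.reverse.foldl
    (fun (s : PySem.Set (Int × Int) × PySem.Set (Int × Int) × PySem.Set (Int × Int)) p =>
      (PySem.Set.add s.1 (p.2, -p.1),
       PySem.Set.add s.2.1 (-p.1, -p.2),
       PySem.Set.add s.2.2 (-p.2, p.1)))
    (PySem.Set.empty, PySem.Set.empty, PySem.Set.empty)

-- ===== PORT B =====
-- B drains `original` with .pop() building only spin_90, then rotates the previous set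
-- by 90 degrees twice more ({(y,-x) for (x,y) in s} = PySem.Set.ofList (s.map rot)).
def spin_set_alt (original : List (Int × Int)) : (List (Int × Int)) × (List (Int × Int)) × (List (Int × Int)) :=
  let spin_90 : PySem.Set (Int × Int) :=
    original.reverse.foldl (fun s p => PySem.Set.add s (p.2, -p.1)) PySem.Set.empty
  let spin_180 : PySem.Set (Int × Int) :=
    PySem.Set.ofList (spin_90.map (fun p => (p.2, -p.1)))
  let spin_270 : PySem.Set (Int × Int) :=
    PySem.Set.ofList (spin_180.map (fun p => (p.2, -p.1)))
  (spin_90, spin_180, spin_270)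

-- ===== PRECONDITION & SPEC =====
def Spec_spin_set (original : List (Int × Int)) (out : (List (Int × Int)) × (List (Int × Int)) × (List (Int × Int))) : Prop := out = spin_set_alt original
instance (original : List (Int × Int)) (out : (List (Int × Int)) × (List (Int × Int)) × (List (Int × Int))) : Decidable (Spec_spin_set original out) := by unfold Spec_spin_set; infer_instance

-- ===== CLAIM (what is proved, stated in full; the proofs are below) =====
def Claim_equal_spin_set : Prop := ∀ (original : List (Int × Int)), Dom_spin_set original → Spec_spin_set original (spin_set original)

-- ===== LEMMAS AND PROOFS =====

-- A's simultaneous fold over a triple of accumulators splits componentwise.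
theorem spin_fold_split (l : List (Int × Int)) (a b c : PySem.Set (Int × Int)) :
    l.foldl (fun s p => (PySem.Set.add s.1 (p.2, -p.1), PySem.Set.add s.2.1 (-p.1, -p.2),
        PySem.Set.add s.2.2 (-p.2, p.1))) (a, b, c)
      = (l.foldl (fun s p => PySem.Set.add s (p.2, -p.1)) a,
         l.foldl (fun s p => PySem.Set.add s (-p.1, -p.2)) b,
         l.foldl (fun s p => PySem.Set.add s (-p.2, p.1)) c) := by
  induction l generalizing a b c with
  | nil => rfl
  | cons x xs ih => simp [List.foldl_cons, ih]

-- Adding a mapped element: injective maps commute with Set.add.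
theorem set_add_map {α β : Type} [BEq α] [LawfulBEq α] [BEq β] [LawfulBEq β]
    (f : α → β) (hf : Function.Injective f) (s : List α) (x : α) :
    PySem.Set.add (s.map f) (f x) = (PySem.Set.add s x).map f := by
  by_cases h : x ∈ s
  · have hm : f x ∈ s.map f := List.mem_map_of_mem h
    simp [PySem.Set.add, PySem.Set.contains, h, hm]
  · have hm : f x ∉ s.map f := by
      simp only [List.mem_map]
      rintro ⟨a, ha, hfa⟩
      exact h (hf hfa ▸ ha)
    simp [PySem.Set.add, PySem.Set.contains, h, hm]

-- Injective maps commute with set construction (first-occurrence dedup).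
theorem ofList_map {α β : Type} [BEq α] [LawfulBEq α] [BEq β] [LawfulBEq β]
    (f : α → β) (hf : Function.Injective f) (l : List α) :
    PySem.Set.ofList (l.map f) = (PySem.Set.ofList l).map f := by
  have h : ∀ (l : List α) (acc : List α),
      (l.map f).foldl PySem.Set.add (acc.map f) = (l.foldl PySem.Set.add acc).map f := by
    intro l
    induction l with
    | nil => intro acc; rfl
    | cons x xs ih => intro acc; simpa [set_add_map f hf] using ih (PySem.Set.add acc x)
  simpa [PySem.Set.ofList] using h l []

-- Building a set from an already-deduplicated list changes nothing: ofList is idempotent.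
theorem ofList_idem {α : Type} [BEq α] [LawfulBEq α] (l : List α) :
    PySem.Set.ofList (PySem.Set.ofList l) = PySem.Set.ofList l := by
  have h : ∀ (m acc : List α), m.Nodup → (∀ x ∈ m, x ∉ acc) →
      m.foldl PySem.Set.add acc = acc ++ m := by
    intro m
    induction m with
    | nil => intro acc _ _; simp
    | cons x xs ih =>
      intro acc hnd hdisj
      have hxm : x ∉ acc := hdisj x (List.mem_cons_self ..)
      have hadd : PySem.Set.add acc x = acc ++ [x] := by
        simp [PySem.Set.add, PySem.Set.contains, hxm]
      have hdisj' : ∀ y ∈ xs, y ∉ acc ++ [x] := by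
        intro y hy
        simp only [List.mem_append, List.mem_singleton]
        rintro (h1 | rfl)
        · exact hdisj y (List.mem_cons_of_mem _ hy) h1
        · exact (List.nodup_cons.mp hnd).1 hy
      rw [List.foldl_cons, hadd, ih (acc ++ [x]) hnd.of_cons hdisj']
      simp
  have hnd : (PySem.Set.ofList l).Nodup := PySem.Set.nodup_ofList l
  have := h (PySem.Set.ofList l) [] hnd (by simp)
  simpa [PySem.Set.ofList] using this

-- A's per-element add of f p equals building the set from the mapped list.
theorem foldl_add_eq_ofList_map {α β : Type} [BEq β] (f : α → β) (l : List α) :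
    l.foldl (fun s p => PySem.Set.add s (f p)) PySem.Set.empty = PySem.Set.ofList (l.map f) := by
  simp [PySem.Set.ofList, List.foldl_map, PySem.Set.empty]

theorem rot_inj : Function.Injective (fun p : Int × Int => (p.2, -p.1)) := by
  intro a b h
  simp only [Prod.mk.injEq] at h
  ext <;> omega

-- ===== VERDICT (by name: the statement is the Claim_ definition above) =====
theorem spin_set_spec : Claim_equal_spin_set := by
  intro original _
  unfold Spec_spin_set
  have key : ∀ (l : List (Int × Int)),
      PySem.Set.ofList ((PySem.Set.ofList l).map (fun p : Int × Int => (p.2, -p.1)))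
        = PySem.Set.ofList (l.map (fun p : Int × Int => (p.2, -p.1))) := by
    intro l
    rw [ofList_map _ rot_inj, ofList_map _ rot_inj, ofList_idem]
  have hgg : (fun p : Int × Int => (-p.1, -p.2))
      = (fun p : Int × Int => (p.2, -p.1)) ∘ (fun p : Int × Int => (p.2, -p.1)) := by
    funext p; simp [Function.comp]
  have hggg : (fun p : Int × Int => (-p.2, p.1))
      = (fun p : Int × Int => (p.2, -p.1)) ∘ ((fun p : Int × Int => (p.2, -p.1)) ∘ (fun p : Int × Int => (p.2, -p.1))) := by
    funext p; simp [Function.comp]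
  unfold spin_set spin_set_alt
  rw [spin_fold_split]
  simp only [foldl_add_eq_ofList_map, key, List.map_map]
  rw [hgg, hggg]
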